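-- pv_equiv track=rewrite | github.com/martian45/micropython-tlc59116 | tlc59116.py | _text_norm
-- ===== SOURCE A (Python) =====
-- def _text_norm(txt):
--     is_char = False
--     txt_sp = ''
--     for n in txt:
--         if n != '.':
--             txt_sp += n
--             is_char = True
--         elif is_char:
--             txt_sp += '.'
--             is_char = False
--         else:
--             txt_sp += (' ' + '.')
--     for n in range(len(txt_sp), 4):
--         txt_sp = ' ' + txt_sp
--     char_count = 0
--     trimmed = ''
--     for n in reversed(txt_sp):
--         if n != '.':
--             trimmed = n + trimmed
--             char_count += 1
--             if char_count == 2: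
--                 break
--         else:
--             trimmed = n + trimmed
--     return trimmed
-- ===== SOURCE B (Python) =====
-- def _text_norm(txt):
--     units = []
--     for c in txt:
--         if c != '.':
--             units.append(c)
--         elif units and not units[-1].endswith('.'):
--             units[-1] += '.'
--         else:
--             units.append(' .')
--     units = [' '] * (2 - len(units)) + units
--     return units[-2] + units[-1]
-- ===== Notes on version B (the rewrite author's own statement) =====
-- stated objective: alternative
-- what changed: B tokenizes the text in one pass into units (a non-dot char optionally carrying one dot, orphan dots becoming ' .' units), pads to two units and returns the last two joined, replacing A's three passes (build dotted string, pad string to length 4, reverse-scan counting two non-dot chars).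
import Mathlib
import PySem

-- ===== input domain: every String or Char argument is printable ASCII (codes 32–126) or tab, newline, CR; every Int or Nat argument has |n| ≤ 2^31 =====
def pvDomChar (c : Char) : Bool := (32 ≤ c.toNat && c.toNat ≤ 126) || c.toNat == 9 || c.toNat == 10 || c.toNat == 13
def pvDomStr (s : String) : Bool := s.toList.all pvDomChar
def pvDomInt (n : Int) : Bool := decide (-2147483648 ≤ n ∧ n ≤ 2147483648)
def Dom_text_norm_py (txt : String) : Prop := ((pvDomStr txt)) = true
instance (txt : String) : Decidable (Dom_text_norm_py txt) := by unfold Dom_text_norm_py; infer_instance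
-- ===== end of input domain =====

-- B tokenizes the text into char(+dot) units and returns the last two, replacing A's
-- three-pass pad-to-4-and-reverse-scan; objective: alternative decomposition (same cost).


-- ===== PORT A =====
-- first loop: (is_char, txt_sp) state over the characters of txt
def tnA_step (st : Bool × List Char) (n : Char) : Bool × List Char :=
  if n ≠ '.' then (true, st.2 ++ [n])
  else if st.1 then (false, st.2 ++ ['.'])
  else (false, st.2 ++ [' ', '.'])

-- second loop: for n in range(len(txt_sp), 4): txt_sp = ' ' + txt_sp
def tnA_pad (l : List Char) : List Char :=
  (PySem.List.pyRange (l.length : Int) 4 1).foldl (fun acc _ => ' ' :: acc) l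

-- third loop: over reversed(txt_sp), with the break at char_count == 2
def tnA_pass3 : List Char → Int → List Char → List Char
  | [], _, trimmed => trimmed
  | n :: rest, cc, trimmed =>
    if n ≠ '.' then
      if cc + 1 = 2 then n :: trimmed
      else tnA_pass3 rest (cc + 1) (n :: trimmed)
    else tnA_pass3 rest cc (n :: trimmed)

def text_norm_py (txt : String) : String :=
  let st := txt.toList.foldl tnA_step (false, [])
  let txt_sp := tnA_pad st.2
  String.mk (tnA_pass3 txt_sp.reverse 0 [])

-- ===== PORT B =====
-- one unit = one non-dot char, optionally followed by its dot
def tnB_step (units : List (List Char)) (c : Char) : List (List Char) :=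
  if c ≠ '.' then units ++ [[c]]
  else if units ≠ [] ∧ (units.getLast?.getD []).getLast? ≠ some '.' then
    units.dropLast ++ [(units.getLast?.getD []) ++ ['.']]
  else units ++ [[' ', '.']]

def text_norm_py_alt (txt : String) : String :=
  let units := txt.toList.foldl tnB_step []
  let units := List.replicate (2 - units.length) [' '] ++ units
  String.mk ((PySem.List.pyGet? units (-2)).getD [] ++ (PySem.List.pyGet? units (-1)).getD [])

-- ===== PRECONDITION & SPEC =====
def Spec_text_norm_py (txt : String) (out : String) : Prop := out = text_norm_py_alt txt
instance (txt : String) (out : String) : Decidable (Spec_text_norm_py txt out) := by unfold Spec_text_norm_py; infer_instance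

-- ===== CLAIM (what is proved, stated in full; the proofs are below) =====
def Claim_equal_text_norm_py : Prop := ∀ (txt : String), Dom_text_norm_py txt → Spec_text_norm_py txt (text_norm_py txt)

-- ===== LEMMAS AND PROOFS =====

-- a unit is one non-dot char, possibly dotted
def GoodUnit (u : List Char) : Prop := ∃ c, c ≠ '.' ∧ (u = [c] ∨ u = [c, '.'])

def GoodUnits (us : List (List Char)) : Prop := ∀ u ∈ us, GoodUnit u

-- A's is_char flag, expressed on B's units
def unitsOpen (us : List (List Char)) : Bool :=
  match us.getLast? with
  | none => false
  | some u => !(u.getLast? == some '.')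

theorem tnB_step_good {us : List (List Char)} (h : GoodUnits us) (c : Char) :
    GoodUnits (tnB_step us c) := by
  unfold tnB_step
  split_ifs with h1 h2
  · intro u hu
    rcases List.mem_append.1 hu with hu | hu
    · exact h u hu
    · simp at hu; exact ⟨c, h1, Or.inl hu⟩
  · intro u hu
    rcases List.mem_append.1 hu with hu | hu
    · exact h u (List.dropLast_subset _ hu)
    · simp at hu
      obtain ⟨hne, hlast⟩ := h2
      obtain ⟨v, hv⟩ := Option.isSome_iff_exists.1 (List.getLast?_isSome.2 hne)
      obtain ⟨d, hd, hform⟩ := h v (List.mem_of_getLast? hv)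
      rcases hform with rfl | rfl
      · exact ⟨d, hd, Or.inr (by simp [hu, hv])⟩
      · exfalso; apply hlast; simp [hv]
  · intro u hu
    rcases List.mem_append.1 hu with hu | hu
    · exact h u hu
    · simp at hu
      exact ⟨' ', by decide, Or.inr hu⟩

theorem step_sim (us : List (List Char)) (c : Char) :
    tnA_step (unitsOpen us, us.flatten) c
      = (unitsOpen (tnB_step us c), (tnB_step us c).flatten) := by
  unfold tnA_step tnB_step
  by_cases hc : c ≠ '.'
  · simp [hc, unitsOpen]
  · have hc' : c = '.' := by simpa using hc
    subst hc'
    simp only [ne_eq, not_true_eq_false, if_false]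
    by_cases h2 : us ≠ [] ∧ (us.getLast?.getD []).getLast? ≠ some '.'
    · have hne := h2.1
      have hlast := h2.2
      obtain ⟨v, hv⟩ := Option.isSome_iff_exists.1 (List.getLast?_isSome.2 hne)
      have hopen : unitsOpen us = true := by
        simp [unitsOpen, hv]
        intro hcontra
        exact hlast (by simp [hv, hcontra])
      have hus : us.dropLast ++ [v] = us := List.dropLast_append_getLast? v hv
      rw [if_pos h2, hopen, if_pos rfl]
      refine Prod.ext ?_ ?_
      · simp [unitsOpen]
      · conv_lhs => rw [← hus]
        simp [hv]
    · have hopen : unitsOpen us = false := by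
        by_cases hne : us = []
        · simp [unitsOpen, hne]
        · obtain ⟨v, hv⟩ := Option.isSome_iff_exists.1 (List.getLast?_isSome.2 hne)
          have : (us.getLast?.getD []).getLast? = some '.' := by
            by_contra hcon
            exact h2 ⟨hne, hcon⟩
          simp [unitsOpen, hv]
          simpa [hv] using this
      rw [if_neg h2, hopen]
      simp [unitsOpen]

theorem fold_sim : ∀ (l : List Char) (us : List (List Char)), GoodUnits us →
    GoodUnits (l.foldl tnB_step us) ∧
    l.foldl tnA_step (unitsOpen us, us.flatten)
      = (unitsOpen (l.foldl tnB_step us), (l.foldl tnB_step us).flatten) := by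
  intro l
  induction l with
  | nil => intro us h; exact ⟨h, rfl⟩
  | cons c rest ih =>
    intro us h
    have hg := tnB_step_good h c
    have := ih (tnB_step us c) hg
    refine ⟨this.1, ?_⟩
    simp only [List.foldl_cons, step_sim us c]
    exact this.2

-- the padding loop prepends one space per range element
theorem pad_eq (l : List Char) :
    tnA_pad l = List.replicate (PySem.List.pyRange (l.length : Int) 4 1).length ' ' ++ l := by
  unfold tnA_pad
  generalize (PySem.List.pyRange (l.length : Int) 4 1) = r
  induction r generalizing l with
  | nil => simp
  | cons x rest ih =>
    simp only [List.foldl_cons, ih (' ' :: l), List.length_cons, List.replicate_succ']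
    simp

-- the reverse scan stops after the last two units, whatever lies before them
theorem pass3_two (a b : List Char) (ha : GoodUnit a) (hb : GoodUnit b) (rest : List Char) :
    tnA_pass3 (b.reverse ++ a.reverse ++ rest) 0 [] = a ++ b := by
  obtain ⟨x, hx, hxf⟩ := ha
  obtain ⟨y, hy, hyf⟩ := hb
  rcases hxf with rfl | rfl <;> rcases hyf with rfl | rfl <;>
    simp [tnA_pass3, hx, hy]

-- ===== VERDICT (by name: the statement is the Claim_ definition above) =====
theorem text_norm_py_spec : Claim_equal_text_norm_py := by
  intro txt _
  unfold Spec_text_norm_py text_norm_py text_norm_py_alt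
  have h0 : GoodUnits ([] : List (List Char)) := by intro u hu; simp at hu
  obtain ⟨hgood, hsim⟩ := fold_sim txt.toList [] h0
  set us := txt.toList.foldl tnB_step [] with hus
  have hflat : (txt.toList.foldl tnA_step (false, [])).2 = us.flatten := by
    have : unitsOpen ([] : List (List Char)) = false := rfl
    rw [show ((false, ([] : List Char)) : Bool × List Char)
          = (unitsOpen [], List.flatten []) by rfl] at *
    rw [hsim]
  simp only [hflat]
  match hshape : us with
  | [] => decide
  | [u] =>
    obtain ⟨c, hc, hform⟩ := hgood u (List.mem_singleton_self u)
    rcases hform with rfl | rfl <;>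
    · rw [pad_eq]
      simp only [PySem.List.length_pyRange_one, List.flatten]
      norm_num
      simp [tnA_pass3, hc, PySem.List.pyGet?, PySem.List.pyIdx?, List.replicate]
  | u1 :: u2 :: tl =>
    have hgood' : GoodUnits (u1 :: u2 :: tl) := hshape ▸ hgood
    -- decompose as front ++ [a, b]
    obtain ⟨a, b, front, hdecomp⟩ : ∃ a b front, u1 :: u2 :: tl = front ++ [a, b] := by
      rcases hrev : (u1 :: u2 :: tl).reverse with _ | ⟨b, _ | ⟨a, fr⟩⟩
      · exfalso; simp at hrev
      · exfalso
        have := congrArg List.length hrev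
        simp at this
      · refine ⟨a, b, fr.reverse, ?_⟩
        have := congrArg List.reverse hrev
        simpa using this
    have ha : GoodUnit a := hgood' a (by rw [hdecomp]; simp)
    have hb : GoodUnit b := hgood' b (by rw [hdecomp]; simp)
    rw [hdecomp, pad_eq]
    have hrepl0 : 2 - (front ++ [a, b]).length = 0 := by simp
    rw [hrepl0, List.replicate_zero, List.nil_append]
    have hA : ((List.replicate (PySem.List.pyRange (((front ++ [a, b]).flatten.length : Nat) : Int) 4 1).length ' '
        ++ (front ++ [a, b]).flatten).reverse)
        = b.reverse ++ a.reverse ++ (front.flatten.reverse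
            ++ List.replicate (PySem.List.pyRange (((front ++ [a, b]).flatten.length : Nat) : Int) 4 1).length ' ') := by
      simp
    rw [hA, pass3_two a b ha hb]
    have hget2 : PySem.List.pyGet? (front ++ [a, b]) (-2) = some a := by
      rw [PySem.List.pyGet?_neg_ofNat _ 2 (by omega) (by simp)]
      simp
    have hget1 : PySem.List.pyGet? (front ++ [a, b]) (-1) = some b := by
      rw [PySem.List.pyGet?_neg_one]
      simp
    rw [hget2, hget1]
    simp
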